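-- pv_equiv track=rewrite | github.com/AndrewGluss/Python | index_of_nearest.py | index_of_nearest
-- ===== SOURCE A (Python) =====
-- def index_of_nearest(numbers, number):
--     """
--     Функция принимает на вход список чисел numbers и число number
--     и возвращает индекс ближайшего числа из списка numbers к числу number
--     """
--     if len(numbers) > 0:
--         min_diff = []
--         for num in numbers:
--             min_d = abs(number-num)
--             min_diff.append(min_d)
--         x = min(min_diff)
--         ind_min = min_diff.index(x)
--         return ind_min
--     else:
--         return -1
-- ===== SOURCE B (Python) =====
-- def index_of_nearest(numbers, number):
--     if not numbers:
--         return -1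
--     best_i = 0
--     best_d = abs(number - numbers[0])
--     i = 1
--     for num in numbers[1:]:
--         d = abs(number - num)
--         if d < best_d:
--             best_i, best_d = i, d
--         i += 1
--     return best_i
-- ===== Notes on version B (the rewrite author's own statement) =====
-- stated objective: simpler
-- what changed: Replaces A's three passes (build the abs-difference list, take min over it, then scan it again with .index) by a single scan keeping the best index and best difference, with strict '<' preserving first-occurrence tie-breaking.
import Mathlib
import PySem

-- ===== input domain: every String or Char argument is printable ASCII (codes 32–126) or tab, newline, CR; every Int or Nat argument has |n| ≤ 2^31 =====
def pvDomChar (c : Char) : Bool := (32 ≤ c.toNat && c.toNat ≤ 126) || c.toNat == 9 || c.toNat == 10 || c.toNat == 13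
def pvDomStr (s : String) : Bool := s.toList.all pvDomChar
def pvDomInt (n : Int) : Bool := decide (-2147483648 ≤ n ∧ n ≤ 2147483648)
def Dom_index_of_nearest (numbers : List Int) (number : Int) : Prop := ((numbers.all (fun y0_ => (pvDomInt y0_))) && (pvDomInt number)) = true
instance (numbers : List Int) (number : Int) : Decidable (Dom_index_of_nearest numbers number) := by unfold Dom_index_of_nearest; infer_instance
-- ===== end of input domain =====

-- B replaces A's three passes (difference list, min, .index) by one scan keeping the
-- best index and best difference (strict '<' keeps the first-occurrence tie-break).


-- ===== PORT A =====
-- min(min_diff) raises only on an empty list and min_diff.index(x) only when x is absent;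
-- both are unreachable here (min_diff is nonempty and x is its minimum), so the .getD
-- defaults are never taken.
def index_of_nearest (numbers : List Int) (number : Int) : Int :=
  if numbers.length > 0 then
    let min_diff := numbers.foldl (fun acc num => acc ++ [|number - num|]) []
    let x := (PySem.List.min? min_diff (fun d => d)).getD 0
    let ind := (PySem.List.index? min_diff x).getD 0
    (ind : Int)
  else -1

-- ===== PORT B =====
def index_of_nearest_alt (numbers : List Int) (number : Int) : Int :=
  match numbers with
  | [] => -1
  | x :: rest =>
    let s := rest.foldl
      (fun (s : Nat × Int × Nat) num =>
        let d := |number - num|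
        if d < s.2.1 then (s.2.2, d, s.2.2 + 1) else (s.1, s.2.1, s.2.2 + 1))
      (0, |number - x|, 1)
    (s.1 : Int)

-- ===== PRECONDITION & SPEC =====
def Spec_index_of_nearest (numbers : List Int) (number : Int) (out : Int) : Prop := out = index_of_nearest_alt numbers number
instance (numbers : List Int) (number : Int) (out : Int) : Decidable (Spec_index_of_nearest numbers number out) := by unfold Spec_index_of_nearest; infer_instance

-- ===== CLAIM (what is proved, stated in full; the proofs are below) =====
def Claim_equal_index_of_nearest : Prop := ∀ (numbers : List Int) (number : Int), Dom_index_of_nearest numbers number → Spec_index_of_nearest numbers number (index_of_nearest numbers number)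

-- ===== LEMMAS AND PROOFS =====

lemma foldl_min_le (ds : List Int) (a : Int) : ds.foldl min a ≤ a := by
  induction ds generalizing a with
  | nil => simp
  | cons d ds ih => exact le_trans (ih (min a d)) (min_le_left a d)

lemma foldl_min_eq_or_mem (ds : List Int) (a : Int) :
    ds.foldl min a = a ∨ ds.foldl min a ∈ ds := by
  induction ds generalizing a with
  | nil => simp
  | cons d ds ih =>
    rcases ih (min a d) with h | h
    · rw [List.foldl_cons, h]
      rcases le_total a d with hle | hle
      · left; exact min_eq_left hle
      · right; rw [min_eq_right hle]; exact List.mem_cons_self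
    · right; rw [List.foldl_cons]; exact List.mem_cons_of_mem _ h

-- the single-scan loop of B, on the already-mapped difference list, computes
-- "first index of the minimum" exactly when the minimum improves on the incoming best
lemma loopB_spec (number : Int) (rest : List Int) :
    ∀ (bi : Nat) (bd : Int) (i : Nat),
    (rest.foldl
      (fun (s : Nat × Int × Nat) num =>
        let d := |number - num|
        if d < s.2.1 then (s.2.2, d, s.2.2 + 1) else (s.1, s.2.1, s.2.2 + 1))
      (bi, bd, i)).1 =
    (if (rest.map (fun num => |number - num|)).foldl min bd < bd then
      i + ((PySem.List.index? (rest.map (fun num => |number - num|))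
              ((rest.map (fun num => |number - num|)).foldl min bd)).getD 0)
     else bi) := by
  induction rest with
  | nil => intro bi bd i; simp
  | cons num rest ih =>
    intro bi bd i
    by_cases h : |number - num| < bd
    · simp only [List.foldl_cons, List.map_cons, if_pos h, min_eq_right (le_of_lt h)]
      rw [ih i |number - num| (i + 1)]
      have hmle : (rest.map (fun num => |number - num|)).foldl min |number - num| ≤ |number - num| :=
        foldl_min_le _ _
      have hmbd : (rest.map (fun num => |number - num|)).foldl min |number - num| < bd := by omega
      simp only [if_pos hmbd]
      by_cases h2 : (rest.map (fun num => |number - num|)).foldl min |number - num| < |number - num|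
      · have hne : |number - num| ≠ (rest.map (fun num => |number - num|)).foldl min |number - num| := by omega
        rw [PySem.List.index?_cons_of_ne _ hne]
        have hmem : (rest.map (fun num => |number - num|)).foldl min |number - num| ∈
            rest.map (fun num => |number - num|) := by
          rcases foldl_min_eq_or_mem (rest.map (fun num => |number - num|)) |number - num| with he | hmem
          · omega
          · exact hmem
        obtain ⟨j, hj⟩ := Option.isSome_iff_exists.1
          ((PySem.List.index?_isSome_iff _ _).2 hmem)
        simp only [if_pos h2, hj, Option.map_some, Option.getD_some]
        omega
      · have he : (rest.map (fun num => |number - num|)).foldl min |number - num| = |number - num| := by omega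
        rw [he, PySem.List.index?_cons_self]
        simp
    · simp only [List.foldl_cons, List.map_cons, if_neg h,
        min_eq_left (by omega : bd ≤ |number - num|)]
      rw [ih bi bd (i + 1)]
      by_cases h2 : (rest.map (fun num => |number - num|)).foldl min bd < bd
      · have hne : |number - num| ≠ (rest.map (fun num => |number - num|)).foldl min bd := by omega
        simp only [if_pos h2, PySem.List.index?_cons_of_ne _ hne]
        have hmem : (rest.map (fun num => |number - num|)).foldl min bd ∈
            rest.map (fun num => |number - num|) := by
          rcases foldl_min_eq_or_mem (rest.map (fun num => |number - num|)) bd with he | hmem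
          · omega
          · exact hmem
        obtain ⟨j, hj⟩ := Option.isSome_iff_exists.1
          ((PySem.List.index?_isSome_iff _ _).2 hmem)
        simp only [hj, Option.map_some, Option.getD_some]
        omega
      · simp only [if_neg h2]

-- ===== VERDICT (by name: the statement is the Claim_ definition above) =====
theorem index_of_nearest_spec : Claim_equal_index_of_nearest := by
  intro numbers number _
  unfold Spec_index_of_nearest index_of_nearest index_of_nearest_alt
  cases numbers with
  | nil => simp
  | cons x rest =>
    have hmap : (x :: rest).foldl (fun acc num => acc ++ [|number - num|]) [] =
        (x :: rest).map (fun num => |number - num|) := by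
      simpa using PySem.List.foldl_append_singleton_eq_map (fun num => |number - num|) (x :: rest) []
    simp only [List.length_cons, gt_iff_lt, Nat.succ_pos, if_pos, hmap, List.map_cons]
    rw [PySem.List.min?_id_cons]
    rw [loopB_spec number rest 0 |number - x| 1]
    simp only [Option.getD_some]
    have hmle : (rest.map (fun num => |number - num|)).foldl min |number - x| ≤ |number - x| :=
      foldl_min_le _ _
    by_cases h2 : (rest.map (fun num => |number - num|)).foldl min |number - x| < |number - x|
    · have hne : |number - x| ≠ (rest.map (fun num => |number - num|)).foldl min |number - x| := by omega
      rw [PySem.List.index?_cons_of_ne _ hne]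
      have hmem : (rest.map (fun num => |number - num|)).foldl min |number - x| ∈
          rest.map (fun num => |number - num|) := by
        rcases foldl_min_eq_or_mem (rest.map (fun num => |number - num|)) |number - x| with he | hmem
        · omega
        · exact hmem
      obtain ⟨j, hj⟩ := Option.isSome_iff_exists.1
        ((PySem.List.index?_isSome_iff _ _).2 hmem)
      rw [hj]
      simp only [if_pos h2, Option.map_some, Option.getD_some]
      push_cast; ring
    · have he : (rest.map (fun num => |number - num|)).foldl min |number - x| = |number - x| := by omega
      rw [he, PySem.List.index?_cons_self, if_neg (by omega : ¬ |number - x| < |number - x|)]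
      simp
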